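-- pv_equiv track=rewrite | github.com/aai-ay06-tpf/insurance-policy-chatbot | injection/eda_tools/pdf_file_tools.py | obtain_header_paragraphs
-- ===== SOURCE A (Python) =====
-- def obtain_header_paragraphs(text: list, extraction: list) -> list:
--     """
--     Obtain the paragraphs that are under the header of the extraction
--
--     Parameters:
--     - text (list): A list of strings containing the text of the policy.
--     - extraction (list): A list of strings containing the article titles.
--
--     Returns:
--     list: A list of lists of strings, each list containing the header paragraphs of the policy
--     """
--     paragraph = []
--     for i, line in enumerate(text):
--         cache = []
--         if line in extraction:
--             while True:
--                 try:
--                     i += 1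
--                     if text[i].strip() == "":
--                         continue
--                     if text[i] in extraction:
--                         paragraph.append(" ".join(cache))
--                         cache = []
--                         break
--                     if len(cache) > 15:
--                         while True:
--                             if not cache[-1].strip().endswith("."):
--                                 cache.pop()
--                             else:
--                                 break
--                         paragraph.append(" ".join(cache))
--                         cache = []
--                         break
--
--                     cache.append(text[i].strip())
--
--                 except IndexError:
--                     paragraph.append(" ".join(cache))
--                     break
--
--     return paragraph
-- ===== SOURCE B (Python) =====
-- def obtain_header_paragraphs(text: list, extraction: list) -> list:
--     """Staged re-implementation: precompute header positions once, pair each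
--     header with the next non-blank header as its paragraph boundary, and build
--     each paragraph by a closed-form filter/slice/trim of that segment (no
--     scan-until-header loop, no try/except)."""
--     headers = [(i, line) for i, line in enumerate(text) if line in extraction]
--     boundaries = [i for i, line in headers if line.strip() != ""]
--     result = []
--     for i, _line in headers:
--         end = next((b for b in boundaries if b > i), len(text))
--         nb = [ln.strip() for ln in text[i + 1:end] if ln.strip() != ""]
--         if len(nb) > 16:
--             nb = nb[:16]
--             while nb and not nb[-1].strip().endswith("."):
--                 nb.pop()
--         result.append(" ".join(nb))
--     return result
-- ===== Notes on version B (the rewrite author's own statement) =====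
-- stated objective: alternative
-- what changed: Instead of re-scanning forward from each header with a while-True/try-except loop, B precomputes the header positions once, pairs each header with the next non-blank header as its segment boundary, and produces each paragraph by a closed-form filter/slice/cap/trim of that segment.
import Mathlib
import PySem

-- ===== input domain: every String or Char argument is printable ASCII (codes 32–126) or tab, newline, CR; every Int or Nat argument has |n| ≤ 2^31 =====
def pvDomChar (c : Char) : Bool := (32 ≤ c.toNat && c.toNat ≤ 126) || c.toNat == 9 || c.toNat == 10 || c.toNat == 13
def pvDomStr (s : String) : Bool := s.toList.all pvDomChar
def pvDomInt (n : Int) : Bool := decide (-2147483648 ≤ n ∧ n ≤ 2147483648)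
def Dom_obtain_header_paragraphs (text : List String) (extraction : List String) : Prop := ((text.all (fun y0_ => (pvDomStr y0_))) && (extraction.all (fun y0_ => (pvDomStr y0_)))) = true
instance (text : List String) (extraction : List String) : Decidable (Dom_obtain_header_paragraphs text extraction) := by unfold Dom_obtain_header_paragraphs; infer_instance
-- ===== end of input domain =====

-- B replaces A's per-header scan-until-next-header loop (with try/except termination) by
-- staged passes: header positions computed once, each paragraph obtained as a closed-form
-- filter/slice/trim of the segment up to the next non-blank header (objective: alternative).

-- ===== PORT A =====
-- A's inner trailing-trim while-loop, recursing over the reversed cache.  The [] case models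
-- the IndexError raised by cache[-1] once the cache has been emptied: the outer except handler
-- then joins the (now empty) cache, i.e. the result is exactly the join of the [] returned here.
def pvTrimRevA : List String → List String
  | [] => []
  | x :: rest =>
    if PySem.Str.endswith (PySem.Str.strip x) "." then x :: rest else pvTrimRevA rest

-- A's 'while True' scan: j is the already-incremented index; text[j] out of range = IndexError.
def pvScanA (text extraction : List String) (j : Nat) (cache : List String) : String :=
  if h : j < text.length then
    let line := text[j]
    if PySem.Str.strip line == "" then pvScanA text extraction (j + 1) cache
    else if extraction.contains line then PySem.Str.join " " cache
    else if cache.length > 15 then PySem.Str.join " " (pvTrimRevA cache.reverse).reverse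
    else pvScanA text extraction (j + 1) (cache ++ [PySem.Str.strip line])
  else PySem.Str.join " " cache
termination_by text.length - j

def obtain_header_paragraphs (text : List String) (extraction : List String) : List String :=
  (PySem.List.enumerate text).foldl
    (fun par p =>
      if extraction.contains p.2 then
        par ++ [pvScanA text extraction (p.1.toNat + 1) []]
      else par)
    []

-- ===== PORT B =====
-- Source B's trim-while loop: pop trailing entries whose strip does not end with "." —
-- exactly dropWhile on the reversed list (exact: same pops, same final list).
def pvTrimB (nb : List String) : List String :=
  (nb.reverse.dropWhile (fun x => !PySem.Str.endswith (PySem.Str.strip x) ".")).reverse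

def obtain_header_paragraphs_alt (text : List String) (extraction : List String) : List String :=
  let headers := (PySem.List.enumerate text).filter (fun p => extraction.contains p.2)
  let boundaries := (headers.filter (fun p => PySem.Str.strip p.2 != "")).map (fun p => p.1)
  headers.map (fun p =>
    let e : Int := (boundaries.find? (fun b => decide (p.1 < b))).getD (text.length : Int)
    let nb := ((PySem.List.slice text (some (p.1 + 1)) (some e)).filter
                 (fun ln => PySem.Str.strip ln != "")).map PySem.Str.strip
    if nb.length > 16 then PySem.Str.join " " (pvTrimB (nb.take 16))
    else PySem.Str.join " " nb)

-- ===== PRECONDITION & SPEC =====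
def Spec_obtain_header_paragraphs (text : List String) (extraction : List String) (out : List String) : Prop := out = obtain_header_paragraphs_alt text extraction
instance (text : List String) (extraction : List String) (out : List String) : Decidable (Spec_obtain_header_paragraphs text extraction out) := by unfold Spec_obtain_header_paragraphs; infer_instance

-- ===== CLAIM (what is proved, stated in full; the proofs are below) =====
def Claim_equal_obtain_header_paragraphs : Prop := ∀ (text : List String) (extraction : List String), Dom_obtain_header_paragraphs text extraction → Spec_obtain_header_paragraphs text extraction (obtain_header_paragraphs text extraction)

-- ===== LEMMAS AND PROOFS =====

-- "non-blank header" predicate: the lines at which A's inner scan terminates.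
def pvIsB (extraction : List String) (l : String) : Bool :=
  extraction.contains l && PySem.Str.strip l != ""

-- the stripped non-blank lines A's scan would collect (ignoring the 16-cap), up to the
-- first non-blank header.
def pvNbOf (extraction : List String) : List String → List String
  | [] => []
  | l :: rest =>
    if PySem.Str.strip l == "" then pvNbOf extraction rest
    else if extraction.contains l then []
    else PySem.Str.strip l :: pvNbOf extraction rest

theorem pvTrim_eq (l : List String) :
    pvTrimRevA l = l.dropWhile (fun x => !PySem.Str.endswith (PySem.Str.strip x) ".") := by
  induction l with
  | nil => rfl
  | cons x rest ih =>
    simp only [pvTrimRevA, List.dropWhile_cons]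
    cases hx : PySem.Str.endswith (PySem.Str.strip x) "." <;> simp [ih]

-- closed form of A's inner scan, generalized over the running cache.
theorem pvScan_closed (text extraction : List String) (j : Nat) (cache : List String)
    (h : cache.length ≤ 16) :
    pvScanA text extraction j cache =
      (if 16 < cache.length + (pvNbOf extraction (text.drop j)).length
       then PySem.Str.join " "
              (pvTrimRevA ((cache ++ pvNbOf extraction (text.drop j)).take 16).reverse).reverse
       else PySem.Str.join " " (cache ++ pvNbOf extraction (text.drop j))) := by
  by_cases hj : j < text.length
  · rw [List.drop_eq_getElem_cons hj, pvScanA, dif_pos hj]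
    simp only [pvNbOf]
    by_cases hb : (PySem.Str.strip text[j] == "") = true
    · rw [if_pos hb, if_pos hb]
      exact pvScan_closed text extraction (j + 1) cache h
    · rw [if_neg hb, if_neg hb]
      by_cases hc : (extraction.contains text[j]) = true
      · rw [if_pos hc, if_pos hc]
        rw [if_neg (by simp; omega)]
        simp
      · rw [if_neg hc, if_neg hc]
        by_cases hl : cache.length > 15
        · have hc16 : cache.length = 16 := by omega
          rw [if_pos hl, if_pos (by simp; omega)]
          have htk : (cache ++ (PySem.Str.strip text[j] :: pvNbOf extraction (text.drop (j + 1)))).take 16 = cache := by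
            rw [List.take_append]
            simp [hc16]
          rw [htk]
        · rw [if_neg hl]
          rw [pvScan_closed text extraction (j + 1) (cache ++ [PySem.Str.strip text[j]])
                (by simp; omega)]
          have ha : (cache ++ [PySem.Str.strip text[j]]) ++ pvNbOf extraction (text.drop (j + 1))
              = cache ++ (PySem.Str.strip text[j] :: pvNbOf extraction (text.drop (j + 1))) := by
            simp
          have hlen : (16 < (cache ++ [PySem.Str.strip text[j]]).length + (pvNbOf extraction (text.drop (j + 1))).length)
              = (16 < cache.length + (PySem.Str.strip text[j] :: pvNbOf extraction (text.drop (j + 1))).length) := by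
            simp
            constructor <;> (intro; omega)
          rw [ha]
          simp only [hlen]
  · rw [pvScanA, dif_neg hj, List.drop_eq_nil_of_le (Nat.le_of_not_lt hj)]
    simp only [pvNbOf, List.append_nil, List.length_nil, Nat.add_zero]
    rw [if_neg (by omega)]
termination_by text.length - j

theorem pvNbOf_eq (extraction lines : List String) :
    pvNbOf extraction lines =
      ((lines.takeWhile (fun l => PySem.Str.strip l == "" || !extraction.contains l)).filter
          (fun l => PySem.Str.strip l != "")).map PySem.Str.strip := by
  induction lines with
  | nil => rfl
  | cons l rest ih =>
    simp only [pvNbOf, List.takeWhile_cons]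
    by_cases hb : (PySem.Str.strip l == "") = true
    · rw [if_pos hb, if_pos (by simp_all)]
      rw [List.filter_cons_of_neg (by simp_all)]
      exact ih
    · rw [if_neg hb]
      by_cases hc : (extraction.contains l) = true
      · rw [if_pos hc, if_neg (by simp_all)]
        simp
      · rw [if_neg hc, if_pos (by simp_all)]
        rw [List.filter_cons_of_pos (by simp_all)]
        rw [List.map_cons, ih]

theorem pvNotPred_eq (extraction : List String) :
    (fun l => !(PySem.Str.strip l == "" || !extraction.contains l)) = pvIsB extraction := by
  funext l
  simp [pvIsB, Bool.not_or, Bool.and_comm, bne]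

-- first element of the boundary list strictly beyond k, defaulted to d, equals the first
-- non-blank-header position at or beyond max (k+1) s (induction over the enumerated tail).
theorem pvFindB (extraction : List String) (ys : List String) (k : Nat) (d : Int) :
    ∀ (s : Nat),
    (((((PySem.List.enumerate ys (s : Int)).filter (fun p => extraction.contains p.2)).filter
          (fun p => PySem.Str.strip p.2 != "")).map (fun p => p.1)).find?
        (fun b => decide ((k : Int) < b))).getD d
      = (if (ys.drop (k + 1 - s)).findIdx (pvIsB extraction) < (ys.drop (k + 1 - s)).length
         then ((max (k + 1) s : Nat) : Int) + ((ys.drop (k + 1 - s)).findIdx (pvIsB extraction) : Int)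
         else d) := by
  induction ys with
  | nil => intro s; simp [PySem.List.enumerate]
  | cons y ys ih =>
    intro s
    have hcast : (s : Int) + 1 = ((s + 1 : Nat) : Int) := by push_cast; ring
    have hconv : s ≤ k ∨ pvIsB extraction y = false →
        (if (ys.drop (k + 1 - (s + 1))).findIdx (pvIsB extraction) < (ys.drop (k + 1 - (s + 1))).length
         then ((max (k + 1) (s + 1) : Nat) : Int) + ((ys.drop (k + 1 - (s + 1))).findIdx (pvIsB extraction) : Int)
         else d)
        = (if ((y :: ys).drop (k + 1 - s)).findIdx (pvIsB extraction) < ((y :: ys).drop (k + 1 - s)).length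
           then ((max (k + 1) s : Nat) : Int) + (((y :: ys).drop (k + 1 - s)).findIdx (pvIsB extraction) : Int)
           else d) := by
      intro hor
      by_cases hs2 : s ≤ k
      · have hd : k + 1 - s = (k - s) + 1 := by omega
        have hd2 : k + 1 - (s + 1) = k - s := by omega
        rw [hd, hd2, List.drop_succ_cons]
        have hm : max (k + 1) (s + 1) = max (k + 1) s := by omega
        rw [hm]
      · have hBf : pvIsB extraction y = false := by
          rcases hor with h | h
          · exact absurd h hs2
          · exact h
        have h0 : k + 1 - s = 0 := by omega
        have h0' : k + 1 - (s + 1) = 0 := by omega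
        rw [h0, h0', List.drop_zero, List.drop_zero, List.findIdx_cons, hBf]
        simp only [cond_false, List.length_cons]
        have hm1 : max (k + 1) (s + 1) = s + 1 := by omega
        have hm2 : max (k + 1) s = s := by omega
        rw [hm1, hm2]
        by_cases hfi : ys.findIdx (pvIsB extraction) < ys.length
        · rw [if_pos hfi, if_pos (by omega)]
          push_cast
          ring
        · rw [if_neg hfi, if_neg (by omega)]
    rw [PySem.List.enumerate_cons]
    by_cases hc : (extraction.contains y) = true
    · rw [List.filter_cons_of_pos (by exact hc)]
      by_cases hs' : (PySem.Str.strip y != "") = true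
      · rw [List.filter_cons_of_pos (by exact hs'), List.map_cons]
        have hB : pvIsB extraction y = true := by unfold pvIsB; rw [hc, hs']; rfl
        by_cases hk : ((k : Int) < (s : Int))
        · rw [List.find?_cons_of_pos (by simpa using hk)]
          have hs : k + 1 ≤ s := by exact_mod_cast hk
          have h0 : k + 1 - s = 0 := by omega
          rw [h0, List.drop_zero]
          rw [if_pos (by rw [List.findIdx_cons, hB]; simp)]
          rw [List.findIdx_cons, hB]
          simp only [Option.getD_some, cond_true, Nat.cast_zero]
          have : max (k + 1) s = s := by omega
          rw [this]
          simp
        · rw [List.find?_cons_of_neg (by simpa using hk)]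
          have hs2 : s ≤ k := by
            have : ¬ k < s := fun hlt => hk (by exact_mod_cast hlt)
            omega
          rw [hcast, ih (s + 1), hconv (Or.inl hs2)]
      · rw [List.filter_cons_of_neg (by exact hs')]
        have hB : pvIsB extraction y = false := by
          simp only [Bool.not_eq_true] at hs'
          unfold pvIsB
          rw [hs']
          simp
        rw [hcast, ih (s + 1), hconv (Or.inr hB)]
    · rw [List.filter_cons_of_neg (by exact hc)]
      have hB : pvIsB extraction y = false := by
        simp only [Bool.not_eq_true] at hc
        unfold pvIsB
        rw [hc]
        simp
      rw [hcast, ih (s + 1), hconv (Or.inr hB)]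

-- per-header equality: A's scan from k+1 equals B's closed-form segment paragraph.
theorem pvSeg_eq (text extraction : List String) (k : Nat) (_hk : k < text.length) :
    pvScanA text extraction (k + 1) [] =
      (let boundaries := (((PySem.List.enumerate text).filter (fun p => extraction.contains p.2)).filter
            (fun p => PySem.Str.strip p.2 != "")).map (fun p => p.1)
       let e : Int := (boundaries.find? (fun b => decide ((k : Int) < b))).getD (text.length : Int)
       let nb := ((PySem.List.slice text (some ((k : Int) + 1)) (some e)).filter
            (fun ln => PySem.Str.strip ln != "")).map PySem.Str.strip
       if nb.length > 16 then PySem.Str.join " " (pvTrimB (nb.take 16))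
       else PySem.Str.join " " nb) := by
  have h0 : ((0 : Nat) : Int) = (0 : Int) := by norm_num
  have hfind := pvFindB extraction text k (text.length : Int) 0
  rw [h0] at hfind
  simp only [Nat.sub_zero, Nat.max_zero] at hfind
  set m := (text.drop (k + 1)).findIdx (pvIsB extraction) with hm
  have hm_le : m ≤ (text.drop (k + 1)).length := List.findIdx_le_length
  -- the slice in B is (text.drop (k+1)).take m in both branches of the find?
  have hslice : PySem.List.slice text (some ((k : Int) + 1))
      (some ((((((PySem.List.enumerate text).filter (fun p => extraction.contains p.2)).filter
            (fun p => PySem.Str.strip p.2 != "")).map (fun p => p.1)).find?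
          (fun b => decide ((k : Int) < b))).getD (text.length : Int)))
      = (text.drop (k + 1)).take m := by
    rw [hfind]
    by_cases hfi : m < (text.drop (k + 1)).length
    · rw [if_pos hfi]
      have : ((k : Int) + 1) = ((k + 1 : Nat) : Int) := by push_cast; ring
      rw [this, PySem.List.slice_natCast_add]
    · rw [if_neg hfi]
      have hmeq : m = (text.drop (k + 1)).length := by omega
      have : ((k : Int) + 1) = ((k + 1 : Nat) : Int) := by push_cast; ring
      rw [this, PySem.List.slice_natCast]
      rw [hmeq, List.take_length]
      exact List.take_of_length_le (by simp)
  rw [pvScan_closed text extraction (k + 1) [] (by simp)]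
  simp only [List.nil_append, List.length_nil, Nat.zero_add]
  rw [hslice]
  have hnb : pvNbOf extraction (text.drop (k + 1))
      = (((text.drop (k + 1)).take m).filter (fun l => PySem.Str.strip l != "")).map PySem.Str.strip := by
    rw [pvNbOf_eq, List.takeWhile_eq_take_findIdx_not, pvNotPred_eq]
  rw [hnb]
  by_cases hgt : 16 < ((((text.drop (k + 1)).take m).filter (fun l => PySem.Str.strip l != "")).map PySem.Str.strip).length
  · rw [if_pos hgt, if_pos hgt, pvTrimB, pvTrim_eq]
  · rw [if_neg hgt, if_neg hgt]

-- ===== VERDICT (by name: the statement is the Claim_ definition above) =====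
theorem obtain_header_paragraphs_spec : Claim_equal_obtain_header_paragraphs := by
  intro text extraction _
  unfold Spec_obtain_header_paragraphs obtain_header_paragraphs obtain_header_paragraphs_alt
  rw [PySem.List.foldl_append_if (fun p => extraction.contains p.2)
        (fun p => pvScanA text extraction (p.1.toNat + 1) []) (PySem.List.enumerate text) []]
  simp only [List.nil_append]
  refine List.map_congr_left (fun p hp => ?_)
  have hmem : p ∈ PySem.List.enumerate text := List.mem_of_mem_filter hp
  obtain ⟨k, hk, rfl⟩ := (PySem.List.mem_enumerate_iff _ _ _).mp hmem
  simp only [zero_add]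
  have ht : ((k : Int)).toNat = k := by simp
  rw [ht]
  rw [pvSeg_eq text extraction k hk]
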